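-- pv_equiv track=rewrite | github.com/humanfirework/K230-Study-Reference | 电赛赛题K230/03_2024_E_ThreePieceChess/Three-piece chess.py | get_chess_presence_status
-- ===== SOURCE A (Python) =====
-- def get_chess_presence_status(board):
--     presence_status = 0
--     for row in range(3):
--         for col in range(3):
--             index = row * 3 + col
--             if board[row][col] != ' ':  # 有棋子
--                 presence_status |= (1 << (8 - index))  # 设置对应位（共9位：index 0~8，对应位8~0）
--     return presence_status & 0x1FF  # 保留低9位（0b111111111，即511）
-- ===== SOURCE B (Python) =====
-- def get_chess_presence_status(board):
--     def go(cells, acc):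
--         if not cells:
--             return acc
--         r, c = cells[0]
--         return go(cells[1:], 2 * acc + (board[r][c] != ' '))
--     return go([(r, c) for r in range(3) for c in range(3)], 0)
-- ===== Notes on version B (the rewrite author's own statement) =====
-- stated objective: alternative
-- what changed: B replaces the nested loops that OR shifted bits into a masked accumulator with a tail-recursive Horner scheme: it builds the flat coordinate list once and folds over it recursively, doubling the accumulator and adding the occupancy bit, with no shifts and no 0x1FF mask.
import Mathlib
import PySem

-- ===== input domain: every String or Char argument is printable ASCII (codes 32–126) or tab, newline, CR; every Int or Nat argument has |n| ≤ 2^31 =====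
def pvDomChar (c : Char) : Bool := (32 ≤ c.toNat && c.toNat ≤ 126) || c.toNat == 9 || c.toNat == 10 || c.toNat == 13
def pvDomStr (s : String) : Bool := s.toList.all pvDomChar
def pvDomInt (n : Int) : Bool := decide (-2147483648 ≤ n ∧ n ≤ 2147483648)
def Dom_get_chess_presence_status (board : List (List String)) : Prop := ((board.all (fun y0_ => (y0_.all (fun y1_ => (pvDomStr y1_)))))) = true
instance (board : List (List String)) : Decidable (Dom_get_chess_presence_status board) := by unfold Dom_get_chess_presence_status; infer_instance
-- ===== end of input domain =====

-- B replaces A's nested loops OR-ing shifted bits under a 0x1FF mask with a tail-recursive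
-- Horner fold over the precomputed flat coordinate list (acc := 2*acc + occupied); same cost.

-- ===== PORT A =====
-- Literal port of A: OR 1 << (8 - index) into an accumulator, then mask with 0x1FF.
-- board[row][col] via pyGet?; the .getD fallback is unreachable under Pre_ (A raises IndexError there).
def get_chess_presence_status (board : List (List String)) : Int :=
  let ps : Int := (PySem.List.pyRange 0 3 1).foldl (fun ps row =>
    (PySem.List.pyRange 0 3 1).foldl (fun ps col =>
      let index := row * 3 + col
      if (PySem.List.pyGet? ((PySem.List.pyGet? board row).getD []) col).getD " " ≠ " " then
        PySem.Int.bor ps ((1 : Int) <<< (8 - index).toNat)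
      else ps) ps) 0
  PySem.Int.band ps 0x1FF

-- ===== PORT B =====
-- Literal port of B's recursive helper go(cells, acc): Horner accumulation over a coordinate list.
def pvGoB (board : List (List String)) : List (Int × Int) → Int → Int
  | [], acc => acc
  | (r, c) :: rest, acc =>
      pvGoB board rest (2 * acc +
        (if (PySem.List.pyGet? ((PySem.List.pyGet? board r).getD []) c).getD " " ≠ " " then 1 else 0))

def get_chess_presence_status_alt (board : List (List String)) : Int :=
  pvGoB board
    ((PySem.List.pyRange 0 3 1).flatMap (fun r => (PySem.List.pyRange 0 3 1).map (fun c => (r, c))))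
    0

-- ===== PRECONDITION & SPEC =====
-- Pre_ excludes exactly the boards where A raises IndexError: fewer than 3 rows, or one of the first 3 rows shorter than 3.
def Pre_get_chess_presence_status (board : List (List String)) : Prop :=
  3 ≤ board.length ∧ ∀ row ∈ board.take 3, 3 ≤ row.length
instance (board : List (List String)) : Decidable (Pre_get_chess_presence_status board) := by unfold Pre_get_chess_presence_status; infer_instance

def pvWitness_get_chess_presence_status : List (List String) :=
  [["X", " ", "o"], [" ", "X", " "], ["o", " ", "X"]]

def Spec_get_chess_presence_status (board : List (List String)) (out : Int) : Prop := out = get_chess_presence_status_alt board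
instance (board : List (List String)) (out : Int) : Decidable (Spec_get_chess_presence_status board out) := by unfold Spec_get_chess_presence_status; infer_instance

-- ===== CLAIM (what is proved, stated in full; the proofs are below) =====
def Claim_equal_get_chess_presence_status : Prop := ∀ (board : List (List String)), Dom_get_chess_presence_status board → Pre_get_chess_presence_status board → Spec_get_chess_presence_status board (get_chess_presence_status board)

-- ===== LEMMAS AND PROOFS =====

-- The equivalence for a fully destructured 3×3 board: reduce the fixed indexing, abstract the
-- nine cell tests into Bools, and decide the resulting 512-case statement.
set_option maxHeartbeats 1000000 in
theorem pv_key (a b c d e f g h i : String) (t0 t1 t2 : List String) (rest : List (List String)) :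
    get_chess_presence_status ((a :: b :: c :: t0) :: (d :: e :: f :: t1) :: (g :: h :: i :: t2) :: rest)
      = get_chess_presence_status_alt ((a :: b :: c :: t0) :: (d :: e :: f :: t1) :: (g :: h :: i :: t2) :: rest) := by
  have hr : PySem.List.pyRange 0 3 1 = [((0:Nat):Int), ((1:Nat):Int), ((2:Nat):Int)] := by decide
  simp only [get_chess_presence_status, get_chess_presence_status_alt, hr, List.foldl,
    List.flatMap_cons, List.flatMap_nil, List.map_cons, List.map_nil, List.append_nil,
    List.cons_append, List.nil_append, pvGoB]
  simp only [PySem.List.pyGet?_natCast, List.getElem?_cons_zero, List.getElem?_cons_succ,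
    Option.getD_some]
  simp only [← Bool.cond_decide]
  generalize decide (¬ a = " ") = b1
  generalize decide (¬ b = " ") = b2
  generalize decide (¬ c = " ") = b3
  generalize decide (¬ d = " ") = b4
  generalize decide (¬ e = " ") = b5
  generalize decide (¬ f = " ") = b6
  generalize decide (¬ g = " ") = b7
  generalize decide (¬ h = " ") = b8
  generalize decide (¬ i = " ") = b9
  revert b1 b2 b3 b4 b5 b6 b7 b8 b9
  decide

-- ===== VERDICT (by name: the statement is the Claim_ definition above) =====
set_option maxHeartbeats 1000000 in
theorem get_chess_presence_status_spec : Claim_equal_get_chess_presence_status := by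
  intro board _ hpre
  unfold Spec_get_chess_presence_status
  obtain ⟨hlen, hrows⟩ := hpre
  rcases board with _ | ⟨r0, _ | ⟨r1, _ | ⟨r2, rest⟩⟩⟩ <;> simp at hlen
  have h0 : 3 ≤ r0.length := hrows r0 (by simp)
  have h1 : 3 ≤ r1.length := hrows r1 (by simp)
  have h2 : 3 ≤ r2.length := hrows r2 (by simp)
  rcases r0 with _ | ⟨a, _ | ⟨b, _ | ⟨c, t0⟩⟩⟩ <;> simp at h0
  rcases r1 with _ | ⟨d, _ | ⟨e, _ | ⟨f, t1⟩⟩⟩ <;> simp at h1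
  rcases r2 with _ | ⟨g, _ | ⟨h, _ | ⟨i, t2⟩⟩⟩ <;> simp at h2
  exact pv_key a b c d e f g h i t0 t1 t2 rest
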